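-- pv_equiv track=rewrite | github.com/hhummel/codewars-kata | python/esolang_mini_stringfuck.py | my_first_interpreter
-- ===== SOURCE A (Python) =====
-- def my_first_interpreter(code):
--     message = []
--     counter = 0
--     for i in range(len(code)):
--       if code[i] == '+':
--         counter += 1
--         counter %= 256
--       elif code[i] == '.':
--         message.append(chr(counter))
--     return ''.join(message)
-- ===== SOURCE B (Python) =====
-- def my_first_interpreter(code):
--     total = 0
--     out = []
--     for seg in code.split('.')[:-1]:
--         total += seg.count('+')
--         out.append(chr(total % 256))
--     return ''.join(out)
-- ===== Notes on version B (the rewrite author's own statement) =====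
-- stated objective: faster
-- what changed: Replaces the per-character counter/branch loop by splitting the code on the output command into segments and doing one running plus-count per segment, emitting one character per segment boundary (C-speed str.split/str.count instead of a Python-level character loop).
import Mathlib
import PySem

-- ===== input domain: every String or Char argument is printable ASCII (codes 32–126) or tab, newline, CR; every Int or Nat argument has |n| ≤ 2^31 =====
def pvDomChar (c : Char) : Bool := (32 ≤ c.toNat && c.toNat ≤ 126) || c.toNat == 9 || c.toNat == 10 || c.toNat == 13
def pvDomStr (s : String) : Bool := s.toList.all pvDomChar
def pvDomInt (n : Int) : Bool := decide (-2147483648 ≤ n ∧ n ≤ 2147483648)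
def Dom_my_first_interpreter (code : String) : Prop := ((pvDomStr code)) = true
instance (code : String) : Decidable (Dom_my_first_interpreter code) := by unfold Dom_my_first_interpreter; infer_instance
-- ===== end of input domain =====

-- B replaces A's per-character counter/branch loop by a split-into-segments pass with a running plus-count (same asymptotics; measurably faster in Python via C-level str.split/str.count).

-- ===== PORT A =====
-- for i in range(len(code)): branch on code[i]; folds over the characters in order with state (message, counter)
def my_first_interpreter (code : String) : String :=
  let res := code.toList.foldl
    (fun (st : List Char × Int) c =>
      if c = '+' then (st.1, PySem.Int.mod (st.2 + 1) 256)
      else if c = '.' then (st.1 ++ [Char.ofNat st.2.toNat], st.2)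
      else st) ([], 0)
  String.mk res.1

-- ===== PORT B =====
-- parts = code.split('.'); for seg in parts[:-1]: total += seg.count('+'); out.append(chr(total % 256))
def my_first_interpreter_alt (code : String) : String :=
  let parts := PySem.Chars.splitOn code.toList ['.']
  let res := (PySem.List.slice parts none (some (-1))).foldl
    (fun (st : Int × List Char) seg =>
      let total := st.1 + (PySem.Chars.count seg ['+'] : Int)
      (total, st.2 ++ [Char.ofNat (PySem.Int.mod total 256).toNat])) (0, [])
  String.mk res.2

-- ===== PRECONDITION & SPEC =====
def Spec_my_first_interpreter (code : String) (out : String) : Prop := out = my_first_interpreter_alt code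
instance (code : String) (out : String) : Decidable (Spec_my_first_interpreter code out) := by unfold Spec_my_first_interpreter; infer_instance

-- ===== CLAIM (what is proved, stated in full; the proofs are below) =====
def Claim_equal_my_first_interpreter : Prop := ∀ (code : String), Dom_my_first_interpreter code → Spec_my_first_interpreter code (my_first_interpreter code)

-- ===== LEMMAS AND PROOFS =====

-- the chars emitted by the rest of the program, given the current counter k (kept in [0,256))
def pvEmit : List Char → Int → List Char
  | [], _ => []
  | c :: cs, k =>
    if c = '+' then pvEmit cs (PySem.Int.mod (k + 1) 256)
    else if c = '.' then Char.ofNat k.toNat :: pvEmit cs k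
    else pvEmit cs k

-- prepend a prefix onto the first piece
def pvConsHead (pre : List Char) : List (List Char) → List (List Char)
  | [] => [pre]
  | s :: r => (pre ++ s) :: r

-- reference split on '.'
def pvSeg : List Char → List (List Char)
  | [] => [[]]
  | c :: cs => if c = '.' then [] :: pvSeg cs else pvConsHead [c] (pvSeg cs)

theorem pvSeg_ne_nil (cs : List Char) : pvSeg cs ≠ [] := by
  induction cs with
  | nil => simp [pvSeg]
  | cons c cs ih =>
    simp only [pvSeg]
    split
    · simp
    · cases h : pvSeg cs with
      | nil => exact absurd h ih
      | cons s r => simp [pvConsHead]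

theorem pvConsHead_append (pre : List Char) (c : Char) (xs : List (List Char)) :
    pvConsHead (pre ++ [c]) xs = pvConsHead pre (pvConsHead [c] xs) := by
  cases xs <;> simp [pvConsHead]

theorem pv_go_spec (n : Nat) : ∀ (l cur : List Char) (acc : List (List Char)), l.length ≤ n →
    PySem.Chars.splitOn.go ['.'] n l cur acc = acc.reverse ++ pvConsHead cur.reverse (pvSeg l) := by
  induction n with
  | zero =>
    intro l cur acc h
    have : l = [] := by cases l <;> simp_all
    subst this
    rw [PySem.Chars.splitOn.go]
    simp [pvSeg, pvConsHead]
  | succ n ih =>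
    intro l cur acc h
    cases l with
    | nil =>
      rw [PySem.Chars.splitOn.go]
      · simp [pvSeg, pvConsHead]
      · omega
    | cons c rest =>
      rw [PySem.Chars.splitOn.go]
      by_cases hc : c = '.'
      · subst hc
        have hp : List.isPrefixOf ['.'] ('.' :: rest) = true := by simp [List.isPrefixOf]
        simp only [hp, if_true, List.length_cons, List.drop_succ_cons, List.length_nil, List.drop_zero]
        rw [ih rest [] (cur.reverse :: acc) (by simpa using h)]
        cases hseg : pvSeg rest with
        | nil => exact absurd hseg (pvSeg_ne_nil rest)
        | cons s r => simp [pvSeg, pvConsHead, hseg]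
      · have hp : List.isPrefixOf ['.'] (c :: rest) = false := by
          simp [List.isPrefixOf]; exact fun h' => absurd h'.symm hc
        simp only [hp, Bool.false_eq_true, if_false]
        rw [ih rest (c :: cur) acc (by simpa using h)]
        simp [pvSeg, hc, List.reverse_cons, pvConsHead_append]

theorem pv_splitOn_eq_seg (cs : List Char) :
    PySem.Chars.splitOn cs ['.'] = pvSeg cs := by
  show PySem.Chars.splitOn.go ['.'] (cs.length + 1) cs [] [] = pvSeg cs
  rw [pv_go_spec (cs.length + 1) cs [] [] (by omega)]
  cases h : pvSeg cs with
  | nil => exact absurd h (pvSeg_ne_nil cs)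
  | cons s r => simp [pvConsHead]

theorem pv_count_go_singleton (v : Char) (n : Nat) : ∀ (l : List Char) (acc : Nat), l.length ≤ n →
    PySem.Chars.count.go [v] n l acc = acc + l.count v := by
  induction n with
  | zero =>
    intro l acc h
    have : l = [] := by cases l <;> simp_all
    subst this
    rw [PySem.Chars.count.go]
    simp
  | succ n ih =>
    intro l acc h
    cases l with
    | nil =>
      rw [PySem.Chars.count.go]
      · simp
      · omega
    | cons c rest =>
      rw [PySem.Chars.count.go]
      by_cases hc : c = v
      · subst hc
        have hp : List.isPrefixOf [c] (c :: rest) = true := by simp [List.isPrefixOf]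
        simp only [hp, if_true, List.length_cons, List.drop_succ_cons, List.length_nil, List.drop_zero]
        rw [ih rest (acc + 1) (by simpa using h)]
        simp
        omega
      · have hp : List.isPrefixOf [v] (c :: rest) = false := by
          simp [List.isPrefixOf]; exact fun h' => absurd h'.symm hc
        simp only [hp, Bool.false_eq_true, if_false]
        rw [ih rest acc (by simpa using h)]
        simp [hc]

theorem pv_count_singleton (cs : List Char) (v : Char) :
    PySem.Chars.count cs [v] = cs.count v := by
  show (if ([v] : List Char).isEmpty = true then cs.length + 1 else PySem.Chars.count.go [v] cs.length cs 0) = cs.count v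
  simp only [List.isEmpty_cons, Bool.false_eq_true, if_false]
  rw [pv_count_go_singleton v cs.length cs 0 (le_refl _)]
  simp

theorem pv_mod_eq (a : Int) : PySem.Int.mod a 256 = a % 256 := by
  show a.fmod 256 = a % 256
  simp [Int.fmod_eq_emod]

theorem pv_foldA (cs : List Char) : ∀ (msg : List Char) (k : Int),
    (cs.foldl
      (fun (st : List Char × Int) c =>
        if c = '+' then (st.1, PySem.Int.mod (st.2 + 1) 256)
        else if c = '.' then (st.1 ++ [Char.ofNat st.2.toNat], st.2)
        else st) (msg, k)).1 = msg ++ pvEmit cs k := by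
  induction cs with
  | nil => intro msg k; simp [pvEmit]
  | cons c cs ih =>
    intro msg k
    by_cases hc : c = '+'
    · subst hc; simp only [List.foldl_cons, if_true, pvEmit]; rw [ih]
    · by_cases hd : c = '.'
      · subst hd
        simp only [List.foldl_cons, pvEmit, if_neg hc, reduceIte]
        rw [ih]; simp
      · simp only [List.foldl_cons, pvEmit, if_neg hc, if_neg hd]; rw [ih]

theorem pv_emit_no_dot (cs : List Char) : ∀ (k : Int), '.' ∉ cs → pvEmit cs k = [] := by
  induction cs with
  | nil => intro k _; simp [pvEmit]
  | cons c cs ih =>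
    intro k h
    simp only [List.mem_cons, not_or] at h
    have hd : ¬ c = '.' := fun hh => h.1 (Eq.symm hh)
    simp only [pvEmit, if_neg hd]
    split
    · exact ih _ h.2
    · exact ih _ h.2

theorem pv_seg_singleton_no_dot (cs : List Char) : ∀ (s : List Char), pvSeg cs = [s] → '.' ∉ cs := by
  induction cs with
  | nil => simp
  | cons c cs ih =>
    intro s h
    by_cases hc : c = '.'
    · subst hc
      simp only [pvSeg, if_true] at h
      obtain ⟨-, h2⟩ := List.cons_eq_cons.mp h
      exact absurd h2 (pvSeg_ne_nil cs)
    · simp only [pvSeg, if_neg hc] at h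
      cases hseg : pvSeg cs with
      | nil => exact absurd hseg (pvSeg_ne_nil cs)
      | cons t r =>
        rw [hseg] at h
        simp only [pvConsHead, List.cons_eq_cons] at h
        obtain ⟨-, h2⟩ := h
        subst h2
        simp only [List.mem_cons, not_or]
        exact ⟨fun hd => hc (Eq.symm hd), ih t hseg⟩

theorem pv_foldB (cs : List Char) : ∀ (t : Int) (out : List Char),
    (((pvSeg cs).dropLast).foldl
      (fun (st : Int × List Char) seg =>
        (st.1 + (PySem.Chars.count seg ['+'] : Int),
         st.2 ++ [Char.ofNat (PySem.Int.mod (st.1 + (PySem.Chars.count seg ['+'] : Int)) 256).toNat])) (t, out)).2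
    = out ++ pvEmit cs (PySem.Int.mod t 256) := by
  induction cs with
  | nil => intro t out; simp [pvSeg, pvEmit]
  | cons c cs ih =>
    intro t out
    by_cases hc : c = '.'
    · subst hc
      simp only [pvSeg, if_true]
      cases hseg : pvSeg cs with
      | nil => exact absurd hseg (pvSeg_ne_nil cs)
      | cons s r =>
        rw [← hseg, List.dropLast_cons_of_ne_nil (hseg ▸ List.cons_ne_nil s r), List.foldl_cons]
        rw [pv_count_singleton]
        simp only [List.count_nil, Nat.cast_zero, add_zero]
        rw [ih t (out ++ [Char.ofNat (PySem.Int.mod t 256).toNat])]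
        simp [pvEmit]
    · simp only [pvSeg, if_neg hc]
      cases hseg : pvSeg cs with
      | nil => exact absurd hseg (pvSeg_ne_nil cs)
      | cons s r =>
        simp only [pvConsHead, List.singleton_append]
        cases r with
        | nil =>
          -- no '.' in cs at all: both sides emit nothing
          simp only [List.dropLast, List.foldl_nil]
          have hnd : '.' ∉ cs := pv_seg_singleton_no_dot cs s hseg
          have hnd' : '.' ∉ (c :: cs) := by
            simp only [List.mem_cons, not_or]
            exact ⟨fun hd => hc (Eq.symm hd), hnd⟩
          rw [pv_emit_no_dot _ _ hnd']
          simp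
        | cons r1 r2 =>
          rw [List.dropLast_cons_of_ne_nil (List.cons_ne_nil r1 r2), List.foldl_cons,
            pv_count_singleton]
          have this1 := ih (t + (if c = '+' then 1 else 0)) out
          rw [hseg, List.dropLast_cons_of_ne_nil (List.cons_ne_nil r1 r2), List.foldl_cons,
            pv_count_singleton] at this1
          have harr : (t, out).1 + ((c :: s).count '+' : Int)
              = t + (if c = '+' then 1 else 0) + ((s.count '+' : Nat) : Int) := by
            by_cases hp : c = '+' <;> simp [List.count_cons, hp] <;> ring
          rw [harr, this1]
          congr 1
          by_cases hp : c = '+'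
          · simp only [hp, pvEmit, reduceIte]
            congr 1
            rw [pv_mod_eq, pv_mod_eq, pv_mod_eq]
            omega
          · simp only [if_neg hp, add_zero, pvEmit, if_neg hp, if_neg hc]

theorem my_first_interpreter_spec : Claim_equal_my_first_interpreter := by
  intro code _
  unfold Spec_my_first_interpreter my_first_interpreter my_first_interpreter_alt
  simp only
  rw [pv_foldA code.toList [] 0, pv_splitOn_eq_seg, PySem.List.slice_to_neg_one,
    pv_foldB code.toList 0 []]
  simp
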